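-- pv_equiv track=rewrite | github.com/Soliloquiess/Python_PS | 프로그래머스/0/181932. 코드 처리하기/코드 처리하기.py | solution
-- ===== SOURCE A (Python) =====
-- def solution(code):
--     answer = []
--     mode = 0
--
--     for idx, char in enumerate(code):
--         if char == '1':
--             mode = 1 - mode  # mode 전환
--         else:
--             if (mode == 0 and idx % 2 == 0) or (mode == 1 and idx % 2 == 1):
--                 answer.append(char)
--
--     return ''.join(answer) if answer else 'EMPTY'
-- ===== SOURCE B (Python) =====
-- def solution(code):
--     # A char survives iff the number of earlier surviving (non-'1') chars is even,
--     # so: delete every '1', then keep every other remaining char.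
--     filtered = [c for c in code if c != '1']
--     kept = [c for i, c in enumerate(filtered) if i % 2 == 0]
--     return ''.join(kept) or 'EMPTY'
-- ===== Notes on version B (the rewrite author's own statement) =====
-- stated objective: simpler
-- what changed: Drops A's index/mode-toggle state machine entirely: since a char is kept iff the count of earlier non-'1' chars is even, B just filters out all '1's and keeps the even positions of the filtered list.
import Mathlib
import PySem

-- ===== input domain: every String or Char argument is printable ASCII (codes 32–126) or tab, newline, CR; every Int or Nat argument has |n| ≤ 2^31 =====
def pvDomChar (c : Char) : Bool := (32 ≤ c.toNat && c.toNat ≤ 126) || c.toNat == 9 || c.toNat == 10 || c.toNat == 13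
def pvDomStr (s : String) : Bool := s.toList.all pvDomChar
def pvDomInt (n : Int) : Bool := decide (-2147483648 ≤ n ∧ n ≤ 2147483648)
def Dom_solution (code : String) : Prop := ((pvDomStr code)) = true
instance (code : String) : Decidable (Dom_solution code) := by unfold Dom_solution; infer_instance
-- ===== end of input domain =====

-- B replaces A's index/mode-toggle state machine by "filter out the '1's, keep every other
-- remaining char"; objective: simpler, same cost.

-- ===== PORT A =====
-- A's for-loop: state = (idx, mode, answer); answer appended at the back as Python does.
def solutionLoop : List Char → Nat → Int → List Char → List Char
  | [], _, _, answer => answer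
  | char :: rest, idx, mode, answer =>
    if char = '1' then solutionLoop rest (idx + 1) (1 - mode) answer
    else if (mode = 0 ∧ idx % 2 = 0) ∨ (mode = 1 ∧ idx % 2 = 1) then
      solutionLoop rest (idx + 1) mode (answer ++ [char])
    else solutionLoop rest (idx + 1) mode answer

def solution (code : String) : String :=
  let answer := solutionLoop code.toList 0 0 []
  if answer ≠ [] then String.ofList answer else "EMPTY"

-- ===== PORT B =====
def solution_alt (code : String) : String :=
  -- filtered = [c for c in code if c != '1']
  let filtered := code.toList.filter (fun c => c ≠ '1')
  -- kept = [c for i, c in enumerate(filtered) if i % 2 == 0]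
  let kept := (PySem.List.enumerate filtered).filterMap
    (fun ic => if PySem.Int.mod ic.1 2 = 0 then some ic.2 else none)
  if kept ≠ [] then String.ofList kept else "EMPTY"

-- ===== PRECONDITION & SPEC =====
def Spec_solution (code : String) (out : String) : Prop := out = solution_alt code
instance (code : String) (out : String) : Decidable (Spec_solution code out) := by unfold Spec_solution; infer_instance

-- ===== CLAIM =====
def Claim_equal_solution : Prop := ∀ (code : String), Dom_solution code → Spec_solution code (solution code)

-- ===== LEMMAS AND PROOFS =====

-- Common characterisation: take every other element, starting (b = true) or skipping (b = false).
def pick : List Char → Bool → List Char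
  | [], _ => []
  | c :: cs, true => c :: pick cs false
  | _ :: cs, false => pick cs true

lemma loop_eq_pick (cs : List Char) (i : Nat) (m : Int) (hm : m = 0 ∨ m = 1) (acc : List Char) :
    solutionLoop cs i m acc
      = acc ++ pick (cs.filter (fun c => c ≠ '1')) (decide (i % 2 = m.toNat)) := by
  induction cs generalizing i m acc with
  | nil => simp [solutionLoop, pick]
  | cons c rest ih =>
    by_cases hc : c = '1'
    · have hpar : (decide ((i + 1) % 2 = (1 - m).toNat)) = (decide (i % 2 = m.toNat)) := by
        rcases hm with h | h <;> subst h <;> simp [decide_eq_decide] <;> omega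
      simp only [solutionLoop, List.filter_cons, hc]
      rw [ih (i + 1) (1 - m) (by rcases hm with h | h <;> subst h <;> norm_num) acc, hpar]
      simp
    · have hcond : ((m = 0 ∧ i % 2 = 0) ∨ (m = 1 ∧ i % 2 = 1)) ↔ i % 2 = m.toNat := by
        rcases hm with h | h <;> subst h <;> constructor <;> intro h' <;> omega
      simp only [solutionLoop, if_neg hc, List.filter_cons, decide_eq_true_eq]
      rw [if_pos hc]
      by_cases hi : i % 2 = m.toNat
      · rw [if_pos (hcond.mpr hi), ih (i + 1) m hm (acc ++ [c])]
        have h1 : (decide (i % 2 = m.toNat)) = true := by simpa using hi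
        have h2 : (decide ((i + 1) % 2 = m.toNat)) = false := by
          simp only [decide_eq_false_iff_not]; omega
        rw [h1, h2]; simp [pick]
      · rw [if_neg (fun h => hi (hcond.mp h)), ih (i + 1) m hm acc]
        have h1 : (decide (i % 2 = m.toNat)) = false := by simpa using hi
        have h2 : (decide ((i + 1) % 2 = m.toNat)) = true := by
          simp only [decide_eq_true_eq]; omega
        rw [h1, h2]; simp [pick]

lemma filterMap_enumerate_eq_pick (xs : List Char) (s : Int) :
    (PySem.List.enumerate xs s).filterMap
        (fun ic => if PySem.Int.mod ic.1 2 = 0 then some ic.2 else none)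
      = pick xs (decide (PySem.Int.mod s 2 = 0)) := by
  induction xs generalizing s with
  | nil => simp [PySem.List.enumerate_nil, pick]
  | cons c rest ih =>
    rw [PySem.List.enumerate_cons, List.filterMap_cons, ih (s + 1)]
    have hmod : PySem.Int.mod s 2 = s % 2 := PySem.Int.mod_eq_emod_of_pos (by norm_num)
    have hmod' : PySem.Int.mod (s + 1) 2 = (s + 1) % 2 := PySem.Int.mod_eq_emod_of_pos (by norm_num)
    by_cases h : PySem.Int.mod s 2 = 0
    · have h2 : (decide (PySem.Int.mod (s + 1) 2 = 0)) = false := by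
        simp only [decide_eq_false_iff_not, hmod']; rw [hmod] at h; omega
      have h1 : (decide (PySem.Int.mod s 2 = 0)) = true := by simpa using h
      have hd : (2 : Int) ∣ s := by rwa [PySem.Int.mod_eq_zero_iff_dvd] at h
      rw [h2, h1]; simp [pick, hd]
    · have h2 : (decide (PySem.Int.mod (s + 1) 2 = 0)) = true := by
        simp only [decide_eq_true_eq, hmod']; rw [hmod] at h; omega
      have h1 : (decide (PySem.Int.mod s 2 = 0)) = false := by simpa using h
      have hd : ¬ (2 : Int) ∣ s := by rwa [PySem.Int.mod_eq_zero_iff_dvd] at h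
      rw [h2, h1]; simp [pick, hd]

-- ===== VERDICT =====
theorem solution_spec : Claim_equal_solution := by
  intro code _
  unfold Spec_solution
  simp only [solution, solution_alt, loop_eq_pick _ 0 0 (Or.inl rfl),
    filterMap_enumerate_eq_pick]
  norm_num
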